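-- pv_equiv track=rewrite | github.com/rpgomez/rbo-analytics | src/rbo_analytics/mapping.py | detect_begin_stream_token
-- ===== SOURCE A (Python) =====
-- from typing import List, Tuple
-- from typing import List, Optional, Tuple, Dict, Set
--
-- def detect_begin_stream_token(lists_of_tokens: List[List[str]]) -> Optional[str]:
--     """
--     Analyzes sequences of tokens to determine if the underlying tokenizer
--     vocabulary includes a dedicated 'begin-new-stream' token (e.g., [CLS], <s>).
--
--     This token is typically added by a tokenizer as the first token of every
--     new input string or sequence.
--
--     Args:
--         lists_of_tokens: A list where each element is a sequence of tokens
--                          (List[str]) produced by tokenizing a distinct input string.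
--
--     Returns:
--         The unique begin-new-stream token (str) if one is consistently found
--         at the start of all non-empty sequences, otherwise returns None.
--     """
--
--     if not lists_of_tokens:
--         return None
--
--     # 1. Extract the first token from every non-empty sequence
--     # Handles cases where an input list (token_list) might be empty.
--     first_tokens: List[str] = [token_list[0] for token_list in lists_of_tokens if token_list]
--
--     if not first_tokens:
--         # If all input lists were empty, we cannot determine a consistent start token.
--         return None
--
--     # 2. Check if all collected first tokens are identical
--     # By converting the list of first tokens to a set, we can check its size.
--     # If the size is 1, all tokens are the same.
--     unique_first_tokens: Set[str] = set(first_tokens)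
--
--     if len(unique_first_tokens) == 1:
--         # Return the single unique token found.
--         # Using .pop() is efficient for a set known to have only one element.
--         return unique_first_tokens.pop()
--     else:
--         # If the set size is > 1, the first token is not consistent across streams.
--         return None
-- ===== SOURCE B (Python) =====
-- from typing import List, Optional
--
-- def detect_begin_stream_token(lists_of_tokens: List[List[str]]) -> Optional[str]:
--     # Single pass: keep one scalar candidate instead of building a list and a set.
--     candidate: Optional[str] = None
--     for token_list in lists_of_tokens:
--         if not token_list:
--             continue
--         if candidate is None:
--             candidate = token_list[0]
--         elif token_list[0] != candidate:
--             return None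
--     return candidate
-- ===== Notes on version B (the rewrite author's own statement) =====
-- stated objective: simpler
-- what changed: Replaced the two-phase build-a-list-of-first-tokens-then-deduplicate-into-a-set approach with a single pass that keeps one scalar candidate and returns None as soon as a disagreeing first token is seen.
import Mathlib
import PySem

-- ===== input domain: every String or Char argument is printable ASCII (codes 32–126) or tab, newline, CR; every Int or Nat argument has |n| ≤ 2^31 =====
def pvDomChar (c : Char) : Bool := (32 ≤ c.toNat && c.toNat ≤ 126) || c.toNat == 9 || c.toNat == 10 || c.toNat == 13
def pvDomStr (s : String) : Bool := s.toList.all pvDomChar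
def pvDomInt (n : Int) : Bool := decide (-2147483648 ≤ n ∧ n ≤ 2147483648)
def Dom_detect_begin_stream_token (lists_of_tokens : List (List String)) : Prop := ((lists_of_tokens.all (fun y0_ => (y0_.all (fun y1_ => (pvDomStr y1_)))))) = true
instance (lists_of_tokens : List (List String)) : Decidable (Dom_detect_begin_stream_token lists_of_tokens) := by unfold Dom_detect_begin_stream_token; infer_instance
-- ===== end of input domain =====

-- B replaces A's list-then-set two-phase check by a single pass with one scalar candidate (simpler).


-- ===== PORT A =====
-- A: guard empty input; collect first token of every non-empty sublist; dedup into a set;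
-- if the set has exactly one element return it (set.pop() on a 1-element set), else None.
def detect_begin_stream_token (lists_of_tokens : List (List String)) : Option String :=
  if lists_of_tokens = [] then none
  else
    let first_tokens : List String := lists_of_tokens.filterMap (fun token_list => token_list.head?)
    if first_tokens = [] then none
    else
      let unique_first_tokens : PySem.Set String := PySem.Set.ofList first_tokens
      if unique_first_tokens.length = 1 then unique_first_tokens.head? else none

-- ===== PORT B =====
-- B: one pass holding a scalar candidate; early None on the first disagreeing first token.
def pvAltGo (candidate : Option String) : List (List String) → Option String
  | [] => candidate
  | token_list :: rest =>
    match token_list with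
    | [] => pvAltGo candidate rest
    | t :: _ =>
      match candidate with
      | none => pvAltGo (some t) rest
      | some c => if t = c then pvAltGo (some c) rest else none

def detect_begin_stream_token_alt (lists_of_tokens : List (List String)) : Option String :=
  pvAltGo none lists_of_tokens

-- ===== PRECONDITION & SPEC =====
def Spec_detect_begin_stream_token (lists_of_tokens : List (List String)) (out : Option String) : Prop := out = detect_begin_stream_token_alt lists_of_tokens
instance (lists_of_tokens : List (List String)) (out : Option String) : Decidable (Spec_detect_begin_stream_token lists_of_tokens out) := by unfold Spec_detect_begin_stream_token; infer_instance

-- ===== CLAIM (what is proved, stated in full; the proofs are below) =====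
def Claim_equal_detect_begin_stream_token : Prop := ∀ (lists_of_tokens : List (List String)), Dom_detect_begin_stream_token lists_of_tokens → Spec_detect_begin_stream_token lists_of_tokens (detect_begin_stream_token lists_of_tokens)

-- ===== LEMMAS AND PROOFS =====

-- proof-only: B's loop restricted to the stream of first tokens
def pvGoS (candidate : Option String) : List String → Option String
  | [] => candidate
  | t :: rest =>
    match candidate with
    | none => pvGoS (some t) rest
    | some c => if t = c then pvGoS (some c) rest else none

-- B's loop only looks at the first token of each non-empty sublist.
theorem pvAltGo_eq_filterMap (cand : Option String) (ls : List (List String)) :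
    pvAltGo cand ls = pvGoS cand (ls.filterMap (fun l => l.head?)) := by
  induction ls generalizing cand with
  | nil => rfl
  | cons l rest ih =>
    cases l with
    | nil => simpa [pvAltGo] using ih cand
    | cons t _ =>
      cases cand with
      | none => simpa [pvAltGo, pvGoS] using ih (some t)
      | some c =>
        by_cases h : t = c <;> simp [pvAltGo, pvGoS, h, ih]

theorem pvGoS_some (c : String) (ts : List String) :
    pvGoS (some c) ts = if ∀ t ∈ ts, t = c then some c else none := by
  induction ts with
  | nil => simp [pvGoS]
  | cons t rest ih =>
    by_cases h : t = c
    · subst h; simp [pvGoS, ih]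
    · simp [pvGoS, h]

theorem pvDiscard_eq_nil (s : PySem.Set String) (c : String) :
    PySem.Set.discard s c = [] ↔ ∀ x ∈ s, x = c := by
  rw [List.eq_nil_iff_forall_not_mem]
  constructor
  · intro h x hx
    by_contra hne
    exact h x ((PySem.Set.mem_discard _ _ _).mpr ⟨hx, hne⟩)
  · intro h x hx
    rcases (PySem.Set.mem_discard _ _ _).mp hx with ⟨hxs, hne⟩
    exact hne (h x hxs)

-- ===== VERDICT (by name: the statement is the Claim_ definition above) =====
theorem detect_begin_stream_token_spec : Claim_equal_detect_begin_stream_token := by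
  unfold Claim_equal_detect_begin_stream_token
  intro ls _
  unfold Spec_detect_begin_stream_token detect_begin_stream_token detect_begin_stream_token_alt
  rw [pvAltGo_eq_filterMap]
  by_cases hnil : ls = []
  · subst hnil; rfl
  · simp only [hnil, if_false]
    cases hft : ls.filterMap (fun l => l.head?) with
    | nil => simp [pvGoS]
    | cons c rest =>
      simp only [pvGoS, pvGoS_some, PySem.Set.ofList_cons]
      by_cases hall : ∀ t ∈ rest, t = c
      · have hd : PySem.Set.discard (PySem.Set.ofList rest) c = [] := by
          rw [pvDiscard_eq_nil]
          intro x hx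
          exact hall x ((PySem.Set.mem_ofList _ _).mp hx)
        simpa [hd] using hall
      · have hd : PySem.Set.discard (PySem.Set.ofList rest) c ≠ [] := by
          intro h
          exact hall (fun x hx => (pvDiscard_eq_nil _ _).mp h x ((PySem.Set.mem_ofList _ _).mpr hx))
        simp [hall, hd]
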